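-- pv_equiv track=rewrite | github.com/AlejaH1213/Python-practice | challenges.py | solution
-- ===== SOURCE A (Python) =====
-- def solution(numbers):
--     new_arr = []
--     # the loop iterates over a range of indices, the loop goes from 0 to len(numbers) - 2 the -2 is used to ensure that there are always three consecutive elements to form a triple
--     for i in range(len(numbers) - 2):
--         # now we assign the values of numbers to variables a b and c respectively
--         a, b, c = numbers[i], numbers[i + 1], numbers[i + 2]
--         # this line checks wehter the current triple satisfies the conditions for the zig zag pattern
--         if (a < b and b > c) or (a > b and b < c):
--             new_arr.append(1)
--         else:
--             new_arr.append(0)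
--     return new_arr
-- ===== SOURCE B (Python) =====
-- def solution(numbers):
--     # pass 1: direction of each adjacent pair (+1 rising, -1 falling, 0 flat)
--     dirs = [(a < b) - (a > b) for a, b in zip(numbers, numbers[1:])]
--     # pass 2: a triple zigzags iff consecutive directions are opposite and non-flat
--     return [1 if d1 != 0 and d1 == -d2 else 0 for d1, d2 in zip(dirs, dirs[1:])]
-- ===== Notes on version B (the rewrite author's own statement) =====
-- stated objective: alternative
-- what changed: Replaces the single index loop reading each raw triple with two zip-based passes: first a table of adjacent-pair directions (+1/-1/0), then a scan marking positions where consecutive directions are opposite and non-flat.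
import Mathlib
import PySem

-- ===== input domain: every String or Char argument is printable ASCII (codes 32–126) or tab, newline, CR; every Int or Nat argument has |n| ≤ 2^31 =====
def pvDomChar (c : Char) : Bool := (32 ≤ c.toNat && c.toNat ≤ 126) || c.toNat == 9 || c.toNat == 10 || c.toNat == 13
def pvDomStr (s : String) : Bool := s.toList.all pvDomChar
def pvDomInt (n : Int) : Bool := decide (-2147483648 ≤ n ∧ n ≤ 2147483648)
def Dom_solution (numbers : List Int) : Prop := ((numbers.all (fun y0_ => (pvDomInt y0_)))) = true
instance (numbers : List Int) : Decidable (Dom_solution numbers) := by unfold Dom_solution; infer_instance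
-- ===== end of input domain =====

-- B replaces A's index loop over raw triples by two zip passes over a table of adjacent-pair directions (alternative decomposition, same cost).


-- ===== PORT A =====
-- for i in range(len(numbers)-2): read the raw triple numbers[i], numbers[i+1], numbers[i+2], append 1/0
-- (each index is always in range when read, so pyGetD with an unused default is exact for numbers[i])
def solution (numbers : List Int) : List Int :=
  (PySem.List.pyRange 0 ((numbers.length : Int) - 2) 1).foldl
    (fun new_arr i =>
      let a := PySem.List.pyGetD numbers i 0
      let b := PySem.List.pyGetD numbers (i + 1) 0
      let c := PySem.List.pyGetD numbers (i + 2) 0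
      if (a < b ∧ b > c) ∨ (a > b ∧ b < c) then new_arr ++ [1] else new_arr ++ [0]) []

-- ===== PORT B =====
-- (a < b) - (a > b)
def pvDir (a b : Int) : Int := (if a < b then 1 else 0) - (if a > b then 1 else 0)

-- pass 1: directions of adjacent pairs; pass 2: mark opposite non-flat consecutive directions
def solution_alt (numbers : List Int) : List Int :=
  let dirs := List.zipWith pvDir numbers numbers.tail
  List.zipWith (fun d1 d2 => if d1 ≠ 0 ∧ d1 = -d2 then 1 else 0) dirs dirs.tail

-- ===== PRECONDITION & SPEC =====
def Spec_solution (numbers : List Int) (out : List Int) : Prop := out = solution_alt numbers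
instance (numbers : List Int) (out : List Int) : Decidable (Spec_solution numbers out) := by unfold Spec_solution; infer_instance

-- ===== CLAIM (what is proved, stated in full; the proofs are below) =====
def Claim_equal_solution : Prop := ∀ (numbers : List Int), Dom_solution numbers → Spec_solution numbers (solution numbers)

-- ===== LEMMAS AND PROOFS =====

-- common recursive characterisation: one 0/1 output per consecutive triple
def pvZZ : List Int → List Int
  | a :: b :: c :: rest =>
      (if (a < b ∧ b > c) ∨ (a > b ∧ b < c) then (1 : Int) else 0) :: pvZZ (b :: c :: rest)
  | _ => []

theorem solution_alt_eq_pvZZ (numbers : List Int) : solution_alt numbers = pvZZ numbers := by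
  induction numbers using pvZZ.induct with
  | case1 a b c rest ih =>
    rw [pvZZ, ← ih]
    simp only [solution_alt, List.tail_cons, List.zipWith_cons_cons]
    congr 1
    unfold pvDir
    split_ifs <;> omega
  | case2 l h =>
    rcases l with _ | ⟨a, _ | ⟨b, _ | ⟨c, rest⟩⟩⟩
    · simp [solution_alt, pvZZ]
    · simp [solution_alt, pvZZ]
    · simp [solution_alt, pvZZ]
    · exact absurd rfl (h a b c rest)

theorem pv_foldl_ite_append (p : Int → Prop) [DecidablePred p] (l : List Int) (init : List Int) :
    l.foldl (fun acc x => if p x then acc ++ [(1:Int)] else acc ++ [0]) init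
      = init ++ l.map (fun x => if p x then (1:Int) else 0) := by
  induction l generalizing init with
  | nil => simp
  | cons x xs ih => by_cases hp : p x <;> simp [hp, ih]

theorem solution_eq_map (l : List Int) :
    solution l = (List.range (l.length - 2)).map (fun k =>
      if (l.getD k 0 < l.getD (k+1) 0 ∧ l.getD (k+1) 0 > l.getD (k+2) 0) ∨
         (l.getD k 0 > l.getD (k+1) 0 ∧ l.getD (k+1) 0 < l.getD (k+2) 0) then (1:Int) else 0) := by
  unfold solution
  rw [pv_foldl_ite_append (p := fun i =>
        (PySem.List.pyGetD l i 0 < PySem.List.pyGetD l (i+1) 0 ∧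
         PySem.List.pyGetD l (i+1) 0 > PySem.List.pyGetD l (i+2) 0) ∨
        (PySem.List.pyGetD l i 0 > PySem.List.pyGetD l (i+1) 0 ∧
         PySem.List.pyGetD l (i+1) 0 < PySem.List.pyGetD l (i+2) 0))]
  rw [PySem.List.pyRange_one]
  have hn : (((l.length : Int) - 2) - 0).toNat = l.length - 2 := by omega
  rw [hn, List.map_map, List.nil_append]
  refine List.map_congr_left (fun k hk => ?_)
  simp only [Function.comp_apply, zero_add,
    show ∀ k : Nat, ((k:Int) + 1) = ((k+1 : Nat) : Int) from fun k => by push_cast; ring,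
    show ∀ k : Nat, ((k:Int) + 2) = ((k+2 : Nat) : Int) from fun k => by push_cast; ring,
    PySem.List.pyGetD_natCast]

theorem map_eq_pvZZ (l : List Int) :
    (List.range (l.length - 2)).map (fun k =>
      if (l.getD k 0 < l.getD (k+1) 0 ∧ l.getD (k+1) 0 > l.getD (k+2) 0) ∨
         (l.getD k 0 > l.getD (k+1) 0 ∧ l.getD (k+1) 0 < l.getD (k+2) 0) then (1:Int) else 0)
      = pvZZ l := by
  induction l using pvZZ.induct with
  | case1 a b c rest ih =>
    rw [pvZZ]
    have hl : (a::b::c::rest).length - 2 = ((b::c::rest).length - 2) + 1 := by simp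
    rw [hl, List.range_succ_eq_map, List.map_cons, List.map_map]
    rw [← ih]
    congr 1
  | case2 l h =>
    rcases l with _ | ⟨a, _ | ⟨b, _ | ⟨c, rest⟩⟩⟩
    · simp [pvZZ]
    · simp [pvZZ]
    · simp [pvZZ]
    · exact absurd rfl (h a b c rest)

-- ===== VERDICT (by name: the statement is the Claim_ definition above) =====
theorem solution_spec : Claim_equal_solution := by
  intro numbers _
  unfold Spec_solution
  rw [solution_eq_map, map_eq_pvZZ, solution_alt_eq_pvZZ]
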